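-- pv_equiv track=rewrite | github.com/k-harada/AtCoder | ADT/20240319/F.py | solve
-- ===== SOURCE A (Python) =====
-- def solve(n, q, query_list):
--     g = dict()
--     res = []
--     for t, a, b in query_list:
--         if t == 1:
--             if a not in g.keys():
--                 g[a] = {b: 1}
--             else:
--                 g[a][b] = 1
--         elif t == 2:
--             if a not in g.keys():
--                 continue
--             else:
--                 g[a][b] = 0
--         else:
--             r = "Yes"
--             if a not in g.keys():
--                 r = "No"
--             elif b not in g[a].keys():
--                 r = "No"
--             elif g[a][b] == 0:
--                 r = "No"
--             if b not in g.keys():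
--                 r = "No"
--             elif a not in g[b].keys():
--                 r = "No"
--             elif g[b][a] == 0:
--                 r = "No"
--             res.append(r)
--
--     return res
-- ===== SOURCE B (Python) =====
-- def solve(n, q, query_list):
--     # pass 1: timeline of add/remove events per directed pair
--     events = {}
--     for i, (t, a, b) in enumerate(query_list):
--         if t == 1 or t == 2:
--             events.setdefault((a, b), []).append((i, t))
--
--     # a->b present at time i iff the last event on (a, b) before i is an add
--     def present(a, b, i):
--         for j, t in reversed(events.get((a, b), ())):
--             if j < i:
--                 return t == 1
--         return False
--
--     # pass 2: answer each check query offline from the timelines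
--     return ["Yes" if present(a, b, i) and present(b, a, i) else "No"
--             for i, (t, a, b) in enumerate(query_list) if t != 1 and t != 2]
-- ===== Notes on version B (the rewrite author's own statement) =====
-- stated objective: alternative
-- what changed: Replaces A's online simulation of a mutable nested-dict graph state by an offline two-phase algorithm: pass 1 builds per-directed-pair event timelines with timestamps, pass 2 answers each check query by scanning the pair's timeline backwards for the last event before the query; no graph state is maintained.
import Mathlib
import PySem

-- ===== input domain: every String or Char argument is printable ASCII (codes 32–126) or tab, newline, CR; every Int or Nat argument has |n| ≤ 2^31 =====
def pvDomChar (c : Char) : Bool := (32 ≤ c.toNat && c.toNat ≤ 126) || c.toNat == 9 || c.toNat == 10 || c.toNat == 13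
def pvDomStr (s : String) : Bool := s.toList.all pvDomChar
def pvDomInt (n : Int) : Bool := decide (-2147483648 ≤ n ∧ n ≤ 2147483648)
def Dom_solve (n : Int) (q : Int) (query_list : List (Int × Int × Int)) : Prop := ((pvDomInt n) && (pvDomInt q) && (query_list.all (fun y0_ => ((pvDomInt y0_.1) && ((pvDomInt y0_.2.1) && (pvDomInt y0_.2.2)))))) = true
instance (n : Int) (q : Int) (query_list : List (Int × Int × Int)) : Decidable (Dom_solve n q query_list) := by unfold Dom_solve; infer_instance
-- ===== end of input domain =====

-- B replaces A's online simulation of a mutable nested-dict graph by an offline two-phase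
-- algorithm (per-pair event timelines, then backward timeline scans per check query);
-- the return values are proved equal (objective: alternative).

-- ===== PORT A =====
-- one query step of A: state is (g, res)
def solveStep (st : PySem.Dict Int (PySem.Dict Int Int) × List String)
    (qu : Int × Int × Int) : PySem.Dict Int (PySem.Dict Int Int) × List String :=
  let t := qu.1; let a := qu.2.1; let b := qu.2.2
  let g := st.1; let res := st.2
  if t = 1 then
    if g.contains a = false then
      (g.insert a (PySem.Dict.empty.insert b 1), res)           -- g[a] = {b: 1}
    else
      (g.insert a (((g.get? a).getD PySem.Dict.empty).insert b 1), res)  -- g[a][b] = 1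
  else if t = 2 then
    if g.contains a = false then (g, res)                       -- continue
    else (g.insert a (((g.get? a).getD PySem.Dict.empty).insert b 0), res)  -- g[a][b] = 0
  else
    let r :=
      if (st.1).contains qu.2.1 = false then "No"   -- a not in g.keys()
      else if (((st.1).get? qu.2.1).getD PySem.Dict.empty).contains qu.2.2 = false then "No"
      else if (((st.1).get? qu.2.1).getD PySem.Dict.empty).getD qu.2.2 0 = 0 then "No"
      else "Yes"
    let r :=
      if (st.1).contains qu.2.2 = false then "No"   -- b not in g.keys()
      else if (((st.1).get? qu.2.2).getD PySem.Dict.empty).contains qu.2.1 = false then "No"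
      else if (((st.1).get? qu.2.2).getD PySem.Dict.empty).getD qu.2.1 0 = 0 then "No"
      else r
    (g, res ++ [r])

def solve (n : Int) (q : Int) (query_list : List (Int × Int × Int)) : List String :=
  (query_list.foldl solveStep (PySem.Dict.empty, [])).2

-- ===== PORT B =====
-- pass 1: per-directed-pair timeline of (timestamp, event type); setdefault+append = modify _ [] (· ++ [_])
def buildEvents (ql : List (Int × Int × Int)) : PySem.Dict (Int × Int) (List (Int × Int)) :=
  (PySem.List.enumerate ql).foldl
    (fun ev e =>
      if e.2.1 = 1 ∨ e.2.1 = 2 then ev.modify e.2.2 [] (· ++ [(e.1, e.2.1)]) else ev)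
    PySem.Dict.empty

-- 'for j, t in reversed(...): if j < i: return t == 1' / 'return False'
def presentB (ev : PySem.Dict (Int × Int) (List (Int × Int))) (a b i : Int) : Bool :=
  match (ev.getD (a, b) []).reverse.find? (fun e => decide (e.1 < i)) with
  | some e => e.2 == 1
  | none => false

-- pass 2: one comprehension element
def solveAltStep (ev : PySem.Dict (Int × Int) (List (Int × Int)))
    (res : List String) (e : Int × Int × Int × Int) : List String :=
  if e.2.1 ≠ 1 ∧ e.2.1 ≠ 2 then
    res ++ [if presentB ev e.2.2.1 e.2.2.2 e.1 && presentB ev e.2.2.2 e.2.2.1 e.1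
            then "Yes" else "No"]
  else res

def solve_alt (n : Int) (q : Int) (query_list : List (Int × Int × Int)) : List String :=
  (PySem.List.enumerate query_list).foldl (solveAltStep (buildEvents query_list)) []

-- ===== PRECONDITION & SPEC =====
def Spec_solve (n : Int) (q : Int) (query_list : List (Int × Int × Int)) (out : List String) : Prop := out = solve_alt n q query_list
instance (n : Int) (q : Int) (query_list : List (Int × Int × Int)) (out : List String) : Decidable (Spec_solve n q query_list out) := by unfold Spec_solve; infer_instance

-- ===== CLAIM (what is proved, stated in full; the proofs are below) =====
def Claim_equal_solve : Prop := ∀ (n : Int) (q : Int) (query_list : List (Int × Int × Int)), Dom_solve n q query_list → Spec_solve n q query_list (solve n q query_list)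

-- ===== LEMMAS AND PROOFS =====

-- "the directed edge a→b is currently present", read off A's nested-dict state
def dirA (g : PySem.Dict Int (PySem.Dict Int Int)) (a b : Int) : Bool :=
  g.contains a && ((g.get? a).getD PySem.Dict.empty).contains b
    && (((g.get? a).getD PySem.Dict.empty).getD b 0 != 0)

-- "the last add/remove event on a→b in the processed prefix is an add"
def stat (pref : List (Int × Int × Int)) (a b : Int) : Bool :=
  pref.foldl (fun s e => if (e.1 = 1 ∨ e.1 = 2) ∧ e.2.1 = a ∧ e.2.2 = b then decide (e.1 = 1) else s) false

-- common reference run: pref = processed prefix, l = remaining queries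
def refRun (pref l : List (Int × Int × Int)) : List String :=
  match l with
  | [] => []
  | e :: rest =>
      if e.1 = 1 ∨ e.1 = 2 then refRun (pref ++ [e]) rest
      else (if stat pref e.2.1 e.2.2 && stat pref e.2.2 e.2.1 then "Yes" else "No")
             :: refRun (pref ++ [e]) rest

theorem stat_append (pref : List (Int × Int × Int)) (e : Int × Int × Int) (a b : Int) :
    stat (pref ++ [e]) a b =
      if (e.1 = 1 ∨ e.1 = 2) ∧ e.2.1 = a ∧ e.2.2 = b then decide (e.1 = 1) else stat pref a b := by
  simp [stat, List.foldl_append]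

theorem dirA_update (g : PySem.Dict Int (PySem.Dict Int Int)) (a b v x y : Int) :
    dirA (g.insert a (((g.get? a).getD PySem.Dict.empty).insert b v)) x y =
      if x = a then (if y = b then v != 0 else dirA g a y) else dirA g x y := by
  by_cases hx : x = a
  · subst hx
    by_cases hy : y = b
    · subst hy
      simp [dirA]
    · have hb : (y == b) = false := by simpa using hy
      simp only [dirA, PySem.Dict.get?_insert, if_neg hy, PySem.Dict.contains_insert]
      by_cases hc : g.contains x = true
      · simp [hb, hc, hy, PySem.Dict.contains_insert, PySem.Dict.getD_insert]
      · simp only [Bool.not_eq_true] at hc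
        rw [(PySem.Dict.get?_eq_none_iff_contains g x).mpr hc]
        simp [hb, hy, hc, PySem.Dict.contains_insert, PySem.Dict.getD_insert,
          PySem.Dict.contains_empty, PySem.Dict.getD_empty]
  · have ha : (x == a) = false := by simpa using hx
    simp [dirA, PySem.Dict.get?_insert, PySem.Dict.contains_insert, hx, ha]

theorem dirA_fresh (g : PySem.Dict Int (PySem.Dict Int Int)) (a b v : Int)
    (hg : g.contains a = false) :
    g.insert a (PySem.Dict.empty.insert b v) =
      g.insert a (((g.get? a).getD PySem.Dict.empty).insert b v) := by
  rw [(PySem.Dict.get?_eq_none_iff_contains g a).mpr hg]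
  rfl

-- pure-Bool form of A's two elif cascades vs the single conjunction test
theorem r_chain (a1 b1 a2 b2 : Bool) (n1 n2 : Int) :
    (if a2 = false then "No" else if b2 = false then "No" else if n2 = 0 then "No"
     else if a1 = false then "No" else if b1 = false then "No" else if n1 = 0 then "No"
     else "Yes")
    = if ((a1 && b1 && (n1 != 0)) && (a2 && b2 && (n2 != 0))) = true then "Yes" else "No" := by
  by_cases h1 : a1 = false <;> by_cases h2 : b1 = false <;> by_cases h3 : n1 = 0 <;>
    by_cases h4 : a2 = false <;> by_cases h5 : b2 = false <;> by_cases h6 : n2 = 0 <;>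
    simp_all

-- A's fold equals the reference run
theorem A_run (l : List (Int × Int × Int)) :
    ∀ (pref : List (Int × Int × Int)) (g : PySem.Dict Int (PySem.Dict Int Int)) (res : List String),
      (∀ a b, dirA g a b = stat pref a b) →
      (l.foldl solveStep (g, res)).2 = res ++ refRun pref l := by
  induction l with
  | nil => intro pref g res H; simp [refRun]
  | cons e rest ih =>
    intro pref g res H
    obtain ⟨t, a, b⟩ := e
    simp only [List.foldl_cons]
    by_cases ht1 : t = 1
    · subst ht1
      have Hnew : ∀ x y, dirA (g.insert a (((g.get? a).getD PySem.Dict.empty).insert b 1)) x y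
          = stat (pref ++ [(1, a, b)]) x y := by
        intro x y
        rw [dirA_update, stat_append]
        by_cases hx : x = a
        · subst hx
          by_cases hy : y = b
          · subst hy; simp
          · have hy' : ¬ b = y := fun h => hy h.symm
            simp [hy, hy', H]
        · have hx' : ¬ a = x := fun h => hx h.symm
          simp [hx, hx', H]
      have hstep : solveStep (g, res) (1, a, b)
          = (g.insert a (((g.get? a).getD PySem.Dict.empty).insert b 1), res) := by
        by_cases hg : g.contains a = false
        · simp [solveStep, hg, dirA_fresh g a b 1 hg]
        · simp [solveStep, hg]
      rw [hstep, ih _ _ _ Hnew]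
      simp [refRun]
    · by_cases ht2 : t = 2
      · subst ht2
        have hcond : ∀ x y : Int, stat (pref ++ [(2, a, b)]) x y
            = if a = x ∧ b = y then false else stat pref x y := by
          intro x y
          rw [stat_append]
          by_cases hx : a = x <;> by_cases hy : b = y <;> simp [hx, hy]
        by_cases hg : g.contains a = false
        · have hstep : solveStep (g, res) (2, a, b) = (g, res) := by
            simp [solveStep, hg]
          have Hnew : ∀ x y, dirA g x y = stat (pref ++ [(2, a, b)]) x y := by
            intro x y
            rw [hcond]
            by_cases hx : a = x
            · by_cases hy : b = y
              · rw [if_pos ⟨hx, hy⟩, ← hx, ← hy]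
                simp [dirA, hg]
              · rw [if_neg (by tauto), H]
            · rw [if_neg (by tauto), H]
          rw [hstep, ih _ _ _ Hnew]
          simp [refRun]
        · have hstep : solveStep (g, res) (2, a, b)
              = (g.insert a (((g.get? a).getD PySem.Dict.empty).insert b 0), res) := by
            simp [solveStep, hg]
          have Hnew : ∀ x y, dirA (g.insert a (((g.get? a).getD PySem.Dict.empty).insert b 0)) x y
              = stat (pref ++ [(2, a, b)]) x y := by
            intro x y
            rw [dirA_update, hcond]
            by_cases hx : x = a
            · subst hx
              by_cases hy : y = b
              · subst hy; simp
              · have hy' : ¬ b = y := fun h => hy h.symm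
                simp [hy, hy', H]
            · have hx' : ¬ a = x := fun h => hx h.symm
              simp [hx, hx', H]
          rw [hstep, ih _ _ _ Hnew]
          simp [refRun]
      · have hstep : solveStep (g, res) (t, a, b)
            = (g, res ++ [if stat pref a b && stat pref b a then "Yes" else "No"]) := by
          simp only [solveStep, if_neg ht1, if_neg ht2]
          refine congrArg (fun r => (g, res ++ [r])) ?_
          rw [r_chain (g.contains a) (((g.get? a).getD PySem.Dict.empty).contains b)
            (g.contains b) (((g.get? b).getD PySem.Dict.empty).contains a)
            (((g.get? a).getD PySem.Dict.empty).getD b 0)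
            (((g.get? b).getD PySem.Dict.empty).getD a 0)]
          have h1 := H a b; have h2 := H b a
          simp only [dirA] at h1 h2
          rw [h1, h2]
        have Hnew : ∀ x y, dirA g x y = stat (pref ++ [(t, a, b)]) x y := by
          intro x y
          rw [stat_append]
          have : ¬ ((t = 1 ∨ t = 2) ∧ (t, a, b).2.1 = x ∧ (t, a, b).2.2 = y) := by
            rintro ⟨h, -⟩; rcases h with h | h <;> [exact ht1 h; exact ht2 h]
          rw [if_neg this]; exact H x y
        rw [hstep, ih _ _ _ Hnew]
        simp [refRun, ht1, ht2]

-- B-side: the timeline stored for a pair is the filtered, enumerated input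
theorem events_getD (ql : List (Int × Int × Int)) (a b : Int) :
    (buildEvents ql).getD (a, b) [] =
      ((PySem.List.enumerate ql).filter
        (fun e => decide (e.2.1 = 1 ∨ e.2.1 = 2) && (e.2.2 == (a, b)))).map
        (fun e => (e.1, e.2.1)) := by
  unfold buildEvents
  rw [PySem.List.foldl_ite_eq_foldl_filter]
  rw [show (List.foldl (fun ev (e : Int × Int × Int × Int) => ev.modify e.2.2 [] (· ++ [(e.1, e.2.1)]))
        PySem.Dict.empty
        ((PySem.List.enumerate ql).filter (fun e => decide (e.2.1 = 1 ∨ e.2.1 = 2))))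
      = List.foldl (fun d (p : (Int × Int) × Int × Int) => d.modify p.1 [] (· ++ [p.2]))
        PySem.Dict.empty
        (((PySem.List.enumerate ql).filter (fun e => decide (e.2.1 = 1 ∨ e.2.1 = 2))).map
          (fun e => (e.2.2, (e.1, e.2.1))))
    from (List.foldl_map
        (f := fun e : Int × Int × Int × Int => (e.2.2, (e.1, e.2.1)))
        (g := fun d (p : (Int × Int) × Int × Int) => d.modify p.1 [] (· ++ [p.2]))
        (l := (PySem.List.enumerate ql).filter (fun e => decide (e.2.1 = 1 ∨ e.2.1 = 2)))
        (init := PySem.Dict.empty)).symm]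
  rw [PySem.Dict.getD_foldl_modify_append]
  rw [List.filter_map]
  simp only [PySem.Dict.getD_empty, List.nil_append, List.map_map, List.filter_filter]
  simp [Function.comp_def, Bool.and_comm]

-- the last-event fold is the last element of the filtered list
theorem foldl_const_getLast {α β : Type} (L : List α) (f : α → β) (init : β) :
    L.foldl (fun _ e => f e) init = (L.getLast?).elim init f := by
  induction L using List.reverseRecOn with
  | nil => rfl
  | append_singleton l x ih => simp [List.foldl_append]

-- indices in an enumeration all lie at or above the start
theorem enum_filter_lt_start (P : (Int × Int × Int) → Bool) (l : List (Int × Int × Int)) (s : Int) :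
    (PySem.List.enumerate l s).filter (fun e => P e.2 && decide (e.1 < s)) = [] := by
  rw [List.filter_eq_nil_iff]
  intro e he
  obtain ⟨k, hk, rfl⟩ := (PySem.List.mem_enumerate_iff l s e).mp he
  simp only [Bool.and_eq_true, decide_eq_true_eq, not_and]
  intro _
  omega

-- restricting the enumeration to indices below s+i is enumerating the first i elements
theorem enum_filter_lt (P : (Int × Int × Int) → Bool) :
    ∀ (l : List (Int × Int × Int)) (s : Int) (i : Nat),
    (PySem.List.enumerate l s).filter (fun e => P e.2 && decide (e.1 < s + (i : Int)))
      = (PySem.List.enumerate (l.take i) s).filter (fun e => P e.2) := by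
  intro l
  induction l with
  | nil => intro s i; simp [PySem.List.enumerate]
  | cons x rest ih =>
    intro s i
    match i with
    | 0 =>
      simp only [Nat.cast_zero, add_zero, List.take_zero]
      exact enum_filter_lt_start P (x :: rest) s
    | Nat.succ i' =>
      rw [List.take_succ_cons, PySem.List.enumerate_cons, PySem.List.enumerate_cons]
      have harg : s + 1 + (i' : Int) = s + ((i' + 1 : Nat) : Int) := by push_cast; ring
      rw [List.filter_cons, List.filter_cons, ← harg, ih (s + 1) i']
      have h2 : decide (s < s + 1 + (i' : Int)) = true := by rw [decide_eq_true_eq]; omega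
      rw [h2, Bool.and_true]

-- the data carried by a filtered enumeration is the filtered list
theorem map_snd_filter_enum (P : (Int × Int × Int) → Bool) :
    ∀ (l : List (Int × Int × Int)) (s : Int),
    ((PySem.List.enumerate l s).filter (fun e => P e.2)).map (fun e => e.2) = l.filter P := by
  intro l
  induction l with
  | nil => intro s; simp [PySem.List.enumerate]
  | cons x rest ih =>
    intro s
    rw [PySem.List.enumerate_cons, List.filter_cons, List.filter_cons]
    by_cases hp : P x = true <;> simp [hp, ih]

theorem presentB_eq_stat (ql : List (Int × Int × Int)) (a b : Int) (i : Nat) :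
    presentB (buildEvents ql) a b (i : Int) = stat (ql.take i) a b := by
  have hP : ∀ e : Int × Int × Int, (decide (e.1 = 1 ∨ e.1 = 2) && (e.2 == (a, b)))
      = decide ((e.1 = 1 ∨ e.1 = 2) ∧ e.2.1 = a ∧ e.2.2 = b) := by
    intro e
    obtain ⟨t, x, y⟩ := e
    by_cases h1 : (t = 1 ∨ t = 2) <;> by_cases h2 : x = a <;> by_cases h3 : y = b <;>
      simp [h1, h2, h3, Prod.ext_iff]
  unfold presentB
  rw [events_getD, ← List.getLast?_filter, List.filter_map, List.filter_filter]
  have hmerge : (fun e : Int × Int × Int × Int =>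
      decide (e.1 < (i : Int)) && (decide (e.2.1 = 1 ∨ e.2.1 = 2) && (e.2.2 == (a, b))))
      = fun e : Int × Int × Int × Int =>
        (fun y : Int × Int × Int => decide ((y.1 = 1 ∨ y.1 = 2) ∧ y.2.1 = a ∧ y.2.2 = b)) e.2
          && decide (e.1 < (0 : Int) + (i : Int)) := by
    funext e
    rw [hP e.2, Bool.and_comm]
    norm_num
  simp only [Function.comp_def]
  rw [hmerge, enum_filter_lt (fun y => decide ((y.1 = 1 ∨ y.1 = 2) ∧ y.2.1 = a ∧ y.2.2 = b)) ql 0 i]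
  rw [stat, PySem.List.foldl_ite_eq_foldl_filter
    (fun e : Int × Int × Int => (e.1 = 1 ∨ e.1 = 2) ∧ e.2.1 = a ∧ e.2.2 = b)
    (fun _ e => decide (e.1 = 1))]
  rw [foldl_const_getLast]
  rw [← map_snd_filter_enum (fun y => decide ((y.1 = 1 ∨ y.1 = 2) ∧ y.2.1 = a ∧ y.2.2 = b)) (ql.take i) 0]
  rw [List.getLast?_map, List.getLast?_map]
  cases ((PySem.List.enumerate (ql.take i) 0).filter
      (fun e => decide ((e.2.1 = 1 ∨ e.2.1 = 2) ∧ e.2.2.1 = a ∧ e.2.2.2 = b))).getLast? with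
  | none => rfl
  | some e => rw [Bool.eq_iff_iff]; simp

-- B's fold equals the reference run
theorem B_run (ql : List (Int × Int × Int)) :
    ∀ (l pref : List (Int × Int × Int)) (res : List String), ql = pref ++ l →
    (PySem.List.enumerate l ((pref.length : Nat) : Int)).foldl (solveAltStep (buildEvents ql)) res
      = res ++ refRun pref l := by
  intro l
  induction l with
  | nil => intro pref res hql; simp [PySem.List.enumerate, refRun]
  | cons e rest ih =>
    intro pref res hql
    obtain ⟨t, a, b⟩ := e
    rw [PySem.List.enumerate_cons, List.foldl_cons]
    have htake : ql.take pref.length = pref := by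
      rw [hql, List.take_left]
    have hlen : ((pref.length : Nat) : Int) + 1 = (((pref ++ [(t, a, b)]).length : Nat) : Int) := by
      simp
    have hql' : ql = (pref ++ [(t, a, b)]) ++ rest := by
      rw [hql, List.append_assoc]; rfl
    by_cases hc : t = 1 ∨ t = 2
    · have hstep : solveAltStep (buildEvents ql) res ((pref.length : Int), (t, a, b)) = res := by
        rcases hc with h | h <;> simp [solveAltStep, h]
      rw [hstep, hlen, ih _ _ hql']
      rcases hc with h | h <;> simp [refRun, h]
    · rw [not_or] at hc
      have hstep : solveAltStep (buildEvents ql) res ((pref.length : Int), (t, a, b))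
          = res ++ [if stat pref a b && stat pref b a then "Yes" else "No"] := by
        simp only [solveAltStep, if_pos hc]
        rw [presentB_eq_stat ql a b pref.length, presentB_eq_stat ql b a pref.length, htake]
      rw [hstep, hlen, ih _ _ hql']
      have : ¬ (t = 1 ∨ t = 2) := by tauto
      simp [refRun, this]

-- ===== VERDICT (by name: the statement is the Claim_ definition above) =====
theorem solve_spec : Claim_equal_solve := by
  intro n q ql _
  show solve n q ql = solve_alt n q ql
  have hA : solve n q ql = refRun [] ql := by
    have H : ∀ a b, dirA PySem.Dict.empty a b = stat [] a b := by
      intro a b; simp [dirA, stat, PySem.Dict.contains_empty]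
    simpa using A_run ql [] PySem.Dict.empty [] H
  have hB : solve_alt n q ql = refRun [] ql := by
    have := B_run ql ql [] [] rfl
    simpa [solve_alt] using this
  rw [hA, hB]
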